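-- pv_equiv track=rewrite | github.com/jirogihub8/DE-THI-HSG | CHỌN HỌC SINH GIỎI LỚP 12 CẤP  2024-2025 Thanh Hóa/CAU1.py | check
-- ===== SOURCE A (Python) =====
-- def check(x):
--     d=-1
--     a=x//10
--     b=x%10
--     d+=a*4
--     for i in range(1,b+1):
--         if i==1 or i==4 or i==6 or i==9:
--             d+=1
--     return d
-- ===== SOURCE B (Python) =====
-- def check(x):
--     b = x % 10
--     return -1 + (x // 10) * 4 + sum(1 for t in (1, 4, 6, 9) if t <= b)
-- ===== Notes on version B (the rewrite author's own statement) =====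
-- stated objective: simpler
-- what changed: Instead of looping over 1..(x mod 10) and testing membership in the four special digits, B iterates over the fixed four-element digit list and counts those not exceeding x mod 10, with a closed-form base term.
import Mathlib
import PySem

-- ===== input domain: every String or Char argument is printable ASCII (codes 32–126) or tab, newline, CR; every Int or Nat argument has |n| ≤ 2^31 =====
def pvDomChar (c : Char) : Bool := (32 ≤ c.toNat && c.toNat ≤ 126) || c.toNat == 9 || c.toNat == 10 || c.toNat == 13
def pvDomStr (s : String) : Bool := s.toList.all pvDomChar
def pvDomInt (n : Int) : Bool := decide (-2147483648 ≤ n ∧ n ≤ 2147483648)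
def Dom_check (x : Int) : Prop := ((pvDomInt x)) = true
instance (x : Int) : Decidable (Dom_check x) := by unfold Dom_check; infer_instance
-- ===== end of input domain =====

-- B replaces A's loop over 1..(x mod 10) with a count over the fixed four-element digit list (simpler, same cost).
-- ===== PORT A =====
-- A: d = -1; d += (x//10)*4; then for i in range(1, x%10+1): if i in {1,4,6,9}: d += 1
def check (x : Int) : Int :=
  let d : Int := -1
  let a := PySem.Int.floordiv x 10
  let b := PySem.Int.mod x 10
  let d := d + a * 4
  (PySem.List.pyRange 1 (b + 1) 1).foldl
    (fun d i => if i = 1 ∨ i = 4 ∨ i = 6 ∨ i = 9 then d + 1 else d) d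

-- ===== PORT B =====
-- B: count of the special digits that are at most the last digit, plus a closed-form base term
def check_alt (x : Int) : Int :=
  let b := PySem.Int.mod x 10
  (-1) + (PySem.Int.floordiv x 10) * 4
    + (([1, 4, 6, 9] : List Int).filter (fun t => t ≤ b)).length

-- ===== PRECONDITION & SPEC =====
def Spec_check (x : Int) (out : Int) : Prop := out = check_alt x
instance (x : Int) (out : Int) : Decidable (Spec_check x out) := by unfold Spec_check; infer_instance

-- ===== CLAIM (what is proved, stated in full; the proofs are below) =====
def Claim_equal_check : Prop := ∀ (x : Int), Dom_check x → Spec_check x (check x)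

-- ===== LEMMAS AND PROOFS =====

-- ===== VERDICT (by name: the statement is the Claim_ definition above) =====
lemma check_digit_eq (b : Int) (hb0 : 0 ≤ b) (hb : b < 10) :
    (PySem.List.pyRange 1 (b + 1) 1).foldl
      (fun d i => if i = 1 ∨ i = 4 ∨ i = 6 ∨ i = 9 then d + 1 else d) (0 : Int)
    = ((([1, 4, 6, 9] : List Int).filter (fun t => t ≤ b)).length : Int) := by
  interval_cases b <;> decide

lemma foldl_count_shift (l : List Int) (d : Int) :
    l.foldl (fun d i => if i = 1 ∨ i = 4 ∨ i = 6 ∨ i = 9 then d + 1 else d) d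
    = d + l.foldl (fun d i => if i = 1 ∨ i = 4 ∨ i = 6 ∨ i = 9 then d + 1 else d) 0 := by
  induction l generalizing d with
  | nil => simp
  | cons h t ih =>
    simp only [List.foldl_cons]
    rw [ih, ih (if h = 1 ∨ h = 4 ∨ h = 6 ∨ h = 9 then 0 + 1 else 0)]
    split <;> ring

theorem check_spec : Claim_equal_check := by
  intro x _
  unfold Spec_check check check_alt
  simp only []
  rw [foldl_count_shift]
  have h := check_digit_eq (PySem.Int.mod x 10)
      (PySem.Int.mod_nonneg x (by norm_num))
      (PySem.Int.mod_lt x (by norm_num))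
  omega
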